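-- pv_equiv track=rewrite | github.com/charlieyou/mala | src/cli/cli.py | _normalize_repeatable_option
-- ===== SOURCE A (Python) =====
-- def _normalize_repeatable_option(values: list[str] | None) -> list[str]:
--     """Normalize a repeatable option that may contain comma-separated values.
--
--     Supports both:
--     - Repeated: --disable coverage --disable review
--     - Comma-separated: --disable "coverage,review"
--     - Mixed: --disable coverage --disable "review,e2e"
--
--     Returns:
--         Flattened list of stripped, non-empty values.
--     """
--     if not values:
--         return []
--     result: list[str] = []
--     for val in values:
--         # Split by comma for backward compat
--         for part in val.split(","):
--             stripped = part.strip()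
--             if stripped:
--                 result.append(stripped)
--     return result
-- ===== SOURCE B (Python) =====
-- def _normalize_repeatable_option(values):
--     """Single character-level scan: build each token in place, committing
--     interior whitespace lazily, so no split() or strip() is ever called."""
--     result = []
--     for val in (values or []):
--         cur = []    # committed characters of the current token
--         pend = []   # whitespace seen after cur, committed only before a later non-space
--         for ch in val:
--             if ch == ",":
--                 if cur:
--                     result.append("".join(cur))
--                 cur = []
--                 pend = []
--             elif ch.isspace():
--                 if cur:
--                     pend.append(ch)
--             else:
--                 cur.extend(pend)
--                 cur.append(ch)
--                 pend = []
--         if cur: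
--             result.append("".join(cur))
--     return result
-- ===== Notes on version B (the rewrite author's own statement) =====
-- stated objective: alternative
-- what changed: Replaced A's per-element split(",")+strip() pipeline by a single character-level scanner that builds each token in place with a lazily-committed whitespace buffer, never calling split or strip.
import Mathlib
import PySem

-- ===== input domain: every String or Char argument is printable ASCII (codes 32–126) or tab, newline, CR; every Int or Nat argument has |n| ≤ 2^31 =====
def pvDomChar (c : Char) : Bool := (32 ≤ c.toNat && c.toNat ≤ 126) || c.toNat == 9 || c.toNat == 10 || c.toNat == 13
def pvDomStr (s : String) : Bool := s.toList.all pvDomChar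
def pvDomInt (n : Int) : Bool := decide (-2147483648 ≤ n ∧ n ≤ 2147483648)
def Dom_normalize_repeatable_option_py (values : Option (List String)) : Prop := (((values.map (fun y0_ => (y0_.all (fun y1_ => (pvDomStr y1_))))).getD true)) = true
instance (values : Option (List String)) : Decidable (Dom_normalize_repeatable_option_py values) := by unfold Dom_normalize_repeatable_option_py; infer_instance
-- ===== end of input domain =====

-- B replaces A's split/strip pipeline by a single character-level scanner with a
-- lazily-committed whitespace buffer (objective: alternative; no split or strip call).

-- ===== PORT A =====
-- for val in values: for part in val.split(","): if part.strip(): result.append(part.strip())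
def normalize_repeatable_option_py (values : Option (List String)) : List String :=
  match values with
  | none => []
  | some vs =>
    if vs = [] then []
    else
      vs.foldl (fun result val =>
        ((PySem.Chars.splitOn val.toList [',']).map String.ofList).foldl
          (fun result part =>
            if PySem.Str.strip part ≠ "" then result ++ [PySem.Str.strip part] else result)
          result) []

-- ===== PORT B =====
-- one step of Source B's inner character loop: state = (result, cur, pend)
def pvStep (st : List String × List Char × List Char) (ch : Char) :
    List String × List Char × List Char :=
  let res := st.1
  let cur := st.2.1
  let pend := st.2.2
  if ch = ',' then
    (if cur ≠ [] then res ++ [String.ofList cur] else res, [], [])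
  else if PySem.Chars.isspace ch then
    (res, cur, if cur ≠ [] then pend ++ [ch] else pend)
  else
    (res, cur ++ pend ++ [ch], [])

-- for val in (values or []): inner char loop via pvStep, then final flush of cur
def normalize_repeatable_option_py_alt (values : Option (List String)) : List String :=
  (values.getD []).foldl (fun result val =>
    let st := val.toList.foldl pvStep (result, [], [])
    if st.2.1 ≠ [] then st.1 ++ [String.ofList st.2.1] else st.1) []

-- ===== PRECONDITION & SPEC =====
def Spec_normalize_repeatable_option_py (values : Option (List String)) (out : List String) : Prop := out = normalize_repeatable_option_py_alt values
instance (values : Option (List String)) (out : List String) : Decidable (Spec_normalize_repeatable_option_py values out) := by unfold Spec_normalize_repeatable_option_py; infer_instance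

-- ===== CLAIM (what is proved, stated in full; the proofs are below) =====
def Claim_equal_normalize_repeatable_option_py : Prop := ∀ (values : Option (List String)), Dom_normalize_repeatable_option_py values → Spec_normalize_repeatable_option_py values (normalize_repeatable_option_py values)

-- ===== LEMMAS AND PROOFS =====

/-- Structural specification of Python's `s.split(",")` on char lists. -/
def mySplit : List Char → List (List Char)
  | [] => [[]]
  | c :: rest => if c = ',' then [] :: mySplit rest else (mySplit rest).modifyHead (c :: ·)

theorem mySplit_ne_nil (l : List Char) : mySplit l ≠ [] := by
  cases l with
  | nil => simp [mySplit]
  | cons c rest =>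
    simp only [mySplit]
    split
    · simp
    · cases hm : mySplit rest with
      | nil => exact absurd hm (mySplit_ne_nil rest)
      | cons a t => simp [List.modifyHead]

theorem go_eq (fuel : Nat) (l cur : List Char) (acc : List (List Char))
    (hfuel : l.length < fuel) :
    PySem.Chars.splitOn.go [','] fuel l cur acc
      = acc.reverse ++ (mySplit l).modifyHead (cur.reverse ++ ·) := by
  induction fuel generalizing l cur acc with
  | zero => omega
  | succ n ih =>
    cases l with
    | nil => simp [PySem.Chars.splitOn.go, mySplit, List.modifyHead]
    | cons c rest =>
      have hlen : rest.length < n := by simpa using hfuel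
      by_cases hc : c = ','
      · subst hc
        rw [show PySem.Chars.splitOn.go [','] (n+1) (',' :: rest) cur acc
              = PySem.Chars.splitOn.go [','] n rest [] (cur.reverse :: acc) by
            simp [PySem.Chars.splitOn.go, List.isPrefixOf]]
        rw [ih rest [] (cur.reverse :: acc) hlen]
        obtain ⟨h', t', hm⟩ : ∃ h' t', mySplit rest = h' :: t' :=
          List.exists_cons_of_ne_nil (mySplit_ne_nil rest)
        simp [mySplit, hm, List.modifyHead]
      · rw [show PySem.Chars.splitOn.go [','] (n+1) (c :: rest) cur acc
              = PySem.Chars.splitOn.go [','] n rest (c :: cur) acc by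
            simp [PySem.Chars.splitOn.go, List.isPrefixOf, Ne.symm hc]]
        rw [ih rest (c :: cur) acc hlen]
        obtain ⟨h', t', hm⟩ : ∃ h' t', mySplit rest = h' :: t' :=
          List.exists_cons_of_ne_nil (mySplit_ne_nil rest)
        simp [mySplit, hc, hm, List.modifyHead]

theorem splitOn_eq (l : List Char) : PySem.Chars.splitOn l [','] = mySplit l := by
  rw [PySem.Chars.splitOn, go_eq (l.length + 1) l [] [] (by omega)]
  obtain ⟨h', t', hm⟩ : ∃ h' t', mySplit l = h' :: t' :=
    List.exists_cons_of_ne_nil (mySplit_ne_nil l)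
  simp [hm, List.modifyHead]

theorem no_comma_mySplit (l : List Char) : ∀ p ∈ mySplit l, ',' ∉ p := by
  induction l with
  | nil => simp [mySplit]
  | cons c rest ih =>
    by_cases hc : c = ','
    · subst hc; simpa [mySplit] using ih
    · obtain ⟨h', t', hm⟩ : ∃ h' t', mySplit rest = h' :: t' :=
        List.exists_cons_of_ne_nil (mySplit_ne_nil rest)
      intro p hp
      rw [mySplit, if_neg hc, hm] at hp
      simp only [List.modifyHead, List.mem_cons] at hp
      rcases hp with hp | hp
      · subst hp
        have := ih h' (by simp [hm])
        simp [this, Ne.symm hc]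
      · exact ih p (by simp [hm, hp])

theorem intercalate_mySplit (l : List Char) :
    List.intercalate [','] (mySplit l) = l := by
  induction l with
  | nil => simp [mySplit, List.intercalate]
  | cons c rest ih =>
    obtain ⟨h', t', hm⟩ : ∃ h' t', mySplit rest = h' :: t' :=
      List.exists_cons_of_ne_nil (mySplit_ne_nil rest)
    by_cases hc : c = ','
    · subst hc
      rw [mySplit, if_pos rfl]
      rw [hm] at ih ⊢
      simp only [List.intercalate] at ih ⊢
      simp_all
    · rw [mySplit, if_neg hc, hm, List.modifyHead]
      rw [hm] at ih
      cases t' with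
      | nil => simpa [List.intercalate] using congrArg (c :: ·) ih
      | cons s ts =>
        simp only [List.intercalate] at ih ⊢
        simp_all

theorem rstrip_cons_not_ws (c : Char) (t : List Char) (h : PySem.Chars.isspace c = false) :
    PySem.Chars.rstrip (c :: t) = c :: PySem.Chars.rstrip t := by
  simp only [PySem.Chars.rstrip, List.reverse_cons, List.dropWhile_append]
  split
  · rename_i he
    simp only [List.isEmpty_iff] at he
    simp [List.dropWhile, h, he]
  · simp

theorem rstrip_cons_ws (c : Char) (t : List Char) (h : PySem.Chars.isspace c = true) :
    PySem.Chars.rstrip (c :: t)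
      = if PySem.Chars.rstrip t = [] then [] else c :: PySem.Chars.rstrip t := by
  simp only [PySem.Chars.rstrip, List.reverse_cons, List.dropWhile_append]
  split
  · rename_i he
    simp only [List.isEmpty_iff] at he
    simp [List.dropWhile, h, he]
  · rename_i he
    simp only [List.isEmpty_iff] at he
    simp [he]

/-- Scanning a comma-free segment from a non-empty current token. -/
theorem scan_seg_cur_ne (s : List Char) (hnc : ',' ∉ s) :
    ∀ (res : List String) (cur pend : List Char), cur ≠ [] →
      ∃ p, s.foldl pvStep (res, cur, pend)
        = (res, (if PySem.Chars.rstrip s = [] then cur else cur ++ pend ++ PySem.Chars.rstrip s), p) := by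
  induction s with
  | nil => intro res cur pend _; exact ⟨pend, by simp [PySem.Chars.rstrip]⟩
  | cons c t ih =>
    intro res cur pend hcur
    have hc : c ≠ ',' := by intro h; exact hnc (by simp [h])
    have hnct : ',' ∉ t := fun h => hnc (by simp [h])
    by_cases hws : PySem.Chars.isspace c
    · have hstep : pvStep (res, cur, pend) c = (res, cur, pend ++ [c]) := by
        simp [pvStep, hc, hws, hcur]
      obtain ⟨p, hp⟩ := ih hnct res cur (pend ++ [c]) hcur
      refine ⟨p, ?_⟩
      rw [List.foldl_cons, hstep, hp, rstrip_cons_ws c t hws]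
      by_cases hrt : PySem.Chars.rstrip t = [] <;> simp [hrt]
    · have hstep : pvStep (res, cur, pend) c = (res, cur ++ pend ++ [c], []) := by
        simp [pvStep, hc, hws]
      obtain ⟨p, hp⟩ := ih hnct res (cur ++ pend ++ [c]) [] (by simp)
      refine ⟨p, ?_⟩
      rw [List.foldl_cons, hstep, hp,
        rstrip_cons_not_ws c t (by simpa using hws)]
      by_cases hrt : PySem.Chars.rstrip t = [] <;> simp [hrt]

/-- Scanning a comma-free segment from the empty state yields the stripped segment. -/
theorem scan_seg (s : List Char) (hnc : ',' ∉ s) (res : List String) :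
    ∃ p, s.foldl pvStep (res, [], []) = (res, PySem.Chars.strip s, p) := by
  induction s with
  | nil => exact ⟨[], by simp [PySem.Chars.strip, PySem.Chars.lstrip, PySem.Chars.rstrip]⟩
  | cons c t ih =>
    have hc : c ≠ ',' := by intro h; exact hnc (by simp [h])
    have hnct : ',' ∉ t := fun h => hnc (by simp [h])
    by_cases hws : PySem.Chars.isspace c
    · have hstep : pvStep (res, [], []) c = (res, [], []) := by simp [pvStep, hc, hws]
      obtain ⟨p, hp⟩ := ih hnct
      refine ⟨p, ?_⟩
      rw [List.foldl_cons, hstep, hp]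
      simp [PySem.Chars.strip, PySem.Chars.lstrip, List.dropWhile, hws]
    · have hstep : pvStep (res, [], []) c = (res, [c], []) := by simp [pvStep, hc, hws]
      obtain ⟨p, hp⟩ := scan_seg_cur_ne t hnct res [c] [] (by simp)
      refine ⟨p, ?_⟩
      rw [List.foldl_cons, hstep, hp]
      have hstrip : PySem.Chars.strip (c :: t) = c :: PySem.Chars.rstrip t := by
        simp [PySem.Chars.strip, PySem.Chars.lstrip, List.dropWhile, hws,
          rstrip_cons_not_ws c t (by simpa using hws)]
      by_cases hrt : PySem.Chars.rstrip t = [] <;> simp [hrt, hstrip]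

/-- What the scanner emits for a list of comma-free segments. -/
def emit (segs : List (List Char)) : List String :=
  (((segs.map PySem.Chars.strip).filter (fun t => t ≠ [])).map String.ofList)

theorem scan_segs (segs : List (List Char)) (hne : segs ≠ [])
    (hnc : ∀ p ∈ segs, ',' ∉ p) (res : List String) :
    (fun st => if st.2.1 ≠ [] then st.1 ++ [String.ofList st.2.1] else st.1)
        ((List.intercalate [','] segs).foldl pvStep (res, ([] : List Char), ([] : List Char)))
      = res ++ emit segs := by
  induction segs generalizing res with
  | nil => exact absurd rfl hne
  | cons s rest ih =>
    cases rest with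
    | nil =>
      obtain ⟨p, hp⟩ := scan_seg s (hnc s (by simp)) res
      have hint : List.intercalate [','] [s] = s := by simp [List.intercalate]
      simp only [hint, hp, emit]
      by_cases hst : PySem.Chars.strip s = [] <;> simp [hst]
    | cons s2 rest2 =>
      have hint : List.intercalate [','] (s :: s2 :: rest2)
          = s ++ ',' :: List.intercalate [','] (s2 :: rest2) := by
        simp [List.intercalate]
      rw [hint]
      obtain ⟨p, hp⟩ := scan_seg s (hnc s (by simp)) res
      have hcomma : pvStep (res, PySem.Chars.strip s, p) ','
          = ((if PySem.Chars.strip s ≠ [] then res ++ [String.ofList (PySem.Chars.strip s)] else res),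
             [], []) := by
        simp [pvStep]
      rw [show s ++ ',' :: List.intercalate [','] (s2 :: rest2)
            = (s ++ [',']) ++ List.intercalate [','] (s2 :: rest2) by simp]
      rw [List.foldl_append, List.foldl_append, hp, List.foldl_cons, List.foldl_nil, hcomma]
      rw [ih (by simp) (fun q hq => hnc q (by simp [hq]))]
      by_cases hst : PySem.Chars.strip s = [] <;> simp [emit, hst]

/-- B's per-string pass appends exactly the stripped non-empty comma-parts. -/
theorem scanVal_eq (res : List String) (val : String) :
    (let st := val.toList.foldl pvStep (res, [], [])
     if st.2.1 ≠ [] then st.1 ++ [String.ofList st.2.1] else st.1)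
      = res ++ emit (mySplit val.toList) := by
  have h := scan_segs (mySplit val.toList) (mySplit_ne_nil _)
      (no_comma_mySplit _) res
  rw [intercalate_mySplit] at h
  simpa using h

/-- Bridge: stripping commutes with String.ofList. -/
theorem str_strip_ofList (p : List Char) :
    PySem.Str.strip (String.ofList p) = String.ofList (PySem.Chars.strip p) := by
  rw [← String.toList_inj]
  simp [PySem.Str.toList_strip]

theorem aVal_eq (res : List String) (val : String) :
    ((PySem.Chars.splitOn val.toList [',']).map String.ofList).foldl
        (fun result part =>
          if PySem.Str.strip part ≠ "" then result ++ [PySem.Str.strip part] else result)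
        res
      = res ++ emit (mySplit val.toList) := by
  rw [splitOn_eq]
  rw [PySem.List.foldl_append_ite (fun p => PySem.Str.strip p ≠ "") PySem.Str.strip _ _]
  congr 1
  simp only [emit, List.filter_map, List.map_map, Function.comp_def]
  congr 1
  · funext p
    exact str_strip_ofList p
  · congr 1
    funext p
    simp [str_strip_ofList]

theorem main_eq (values : Option (List String)) :
    normalize_repeatable_option_py values = normalize_repeatable_option_py_alt values := by
  match values with
  | none => rfl
  | some vs =>
    by_cases hvs : vs = []
    · subst hvs; rfl
    · simp only [normalize_repeatable_option_py, normalize_repeatable_option_py_alt,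
        if_neg hvs, Option.getD_some]
      exact List.foldl_ext _ _ [] (fun res val _ =>
        (aVal_eq res val).trans (scanVal_eq res val).symm)

-- ===== VERDICT (by name: the statement is the Claim_ definition above) =====
theorem normalize_repeatable_option_py_spec : Claim_equal_normalize_repeatable_option_py := by
  intro values _
  exact main_eq values
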